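-- pv_equiv track=rewrite | github.com/nicolasigor/Sleep-EEG-Event-Detector | sleeprnn/helpers/misc.py | get_inta_eog_emg_names
-- ===== SOURCE A (Python) =====
-- def get_inta_eog_emg_names(signal_names):
--     result = []
--     # Look for EOG
--     possible_names = ["MOR", "ojo izquierdo"]
--     for single_name in signal_names:
--         if single_name in possible_names:
--             result.append(single_name)
--             break
--
--     # Look for EMG
--     possible_names = ["EMG", "EMG menton"]
--     for single_name in signal_names:
--         if single_name in possible_names:
--             result.append(single_name)
--             break
--     return result
-- ===== SOURCE B (Python) =====
-- def get_inta_eog_emg_names(signal_names):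
--     eog = None
--     emg = None
--     for name in signal_names:
--         if eog is None and name in ("MOR", "ojo izquierdo"):
--             eog = name
--         elif emg is None and name in ("EMG", "EMG menton"):
--             emg = name
--         if eog is not None and emg is not None:
--             break
--     return [x for x in (eog, emg) if x is not None]
-- ===== Notes on version B (the rewrite author's own statement) =====
-- stated objective: alternative
-- what changed: Replaces A's two sequential scans of signal_names by a single pass that tracks the first EOG and first EMG match in two Option variables with an early break once both are found, then assembles the result in fixed EOG-then-EMG order.
import Mathlib
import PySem

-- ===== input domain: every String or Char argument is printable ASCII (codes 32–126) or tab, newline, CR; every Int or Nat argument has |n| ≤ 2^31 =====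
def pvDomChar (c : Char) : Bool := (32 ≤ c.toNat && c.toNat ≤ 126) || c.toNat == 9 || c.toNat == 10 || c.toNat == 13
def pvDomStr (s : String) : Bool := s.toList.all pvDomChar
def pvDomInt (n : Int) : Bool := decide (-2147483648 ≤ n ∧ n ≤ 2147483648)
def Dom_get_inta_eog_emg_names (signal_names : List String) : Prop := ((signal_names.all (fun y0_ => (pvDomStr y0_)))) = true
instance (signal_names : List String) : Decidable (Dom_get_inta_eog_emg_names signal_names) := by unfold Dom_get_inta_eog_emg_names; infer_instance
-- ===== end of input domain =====

-- B replaces A's two sequential scans by one single pass tracking both matches with an early break (objective: alternative; same cost).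
-- ===== PORT A =====
-- first loop of A: append first element of `names` found in `poss` to `result`, then break
def pvLoopA (names : List String) (poss : List String) (result : List String) : List String :=
  match names with
  | [] => result
  | n :: rest => if n ∈ poss then result ++ [n] else pvLoopA rest poss result

def get_inta_eog_emg_names (signal_names : List String) : List String :=
  let result : List String := []
  let result := pvLoopA signal_names ["MOR", "ojo izquierdo"] result
  let result := pvLoopA signal_names ["EMG", "EMG menton"] result
  result

-- ===== PORT B =====
-- single pass of B: track first EOG and first EMG match, break once both are set
def pvLoopB (names : List String) (eog emg : Option String) : Option String × Option String :=
  match names with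
  | [] => (eog, emg)
  | n :: rest =>
    let st :=
      if eog = none ∧ n ∈ ["MOR", "ojo izquierdo"] then (some n, emg)
      else if emg = none ∧ n ∈ ["EMG", "EMG menton"] then (eog, some n)
      else (eog, emg)
    if st.1 ≠ none ∧ st.2 ≠ none then st else pvLoopB rest st.1 st.2

def get_inta_eog_emg_names_alt (signal_names : List String) : List String :=
  let st := pvLoopB signal_names none none
  st.1.toList ++ st.2.toList

-- ===== PRECONDITION & SPEC =====
def Spec_get_inta_eog_emg_names (signal_names : List String) (out : List String) : Prop := out = get_inta_eog_emg_names_alt signal_names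
instance (signal_names : List String) (out : List String) : Decidable (Spec_get_inta_eog_emg_names signal_names out) := by unfold Spec_get_inta_eog_emg_names; infer_instance

-- ===== CLAIM (what is proved, stated in full; the proofs are below) =====
def Claim_equal_get_inta_eog_emg_names : Prop := ∀ (signal_names : List String), Dom_get_inta_eog_emg_names signal_names → Spec_get_inta_eog_emg_names signal_names (get_inta_eog_emg_names signal_names)

-- ===== LEMMAS AND PROOFS =====

-- ===== VERDICT (by name: the statement is the Claim_ definition above) =====
theorem pvLoopA_eq (names poss acc : List String) :
    pvLoopA names poss acc = acc ++ (names.find? (fun n => n ∈ poss)).toList := by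
  induction names generalizing acc with
  | nil => simp [pvLoopA]
  | cons n rest ih =>
    by_cases h : n ∈ poss
    · simp [pvLoopA, List.find?, h]
    · simp [pvLoopA, List.find?, h, ih]

theorem pvLoopB_eq (names : List String) (eog emg : Option String) :
    pvLoopB names eog emg =
      (eog.or (names.find? (fun n => n ∈ (["MOR", "ojo izquierdo"] : List String))),
       emg.or (names.find? (fun n => n ∈ (["EMG", "EMG menton"] : List String)))) := by
  induction names generalizing eog emg with
  | nil => simp [pvLoopB]
  | cons n rest ih =>
    by_cases h1 : n ∈ (["MOR", "ojo izquierdo"] : List String) <;>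
    by_cases h2 : n ∈ (["EMG", "EMG menton"] : List String)
    · -- impossible: the two name lists are disjoint
      simp at h1 h2
      rcases h1 with h1 | h1 <;> rcases h2 with h2 | h2 <;> simp [h1] at h2
    all_goals cases eog <;> cases emg <;>
      simp [pvLoopB, List.find?, h1, h2, ih, Option.or]

theorem get_inta_eog_emg_names_spec : Claim_equal_get_inta_eog_emg_names := by
  intro signal_names _
  unfold Spec_get_inta_eog_emg_names get_inta_eog_emg_names get_inta_eog_emg_names_alt
  simp [pvLoopA_eq, pvLoopB_eq, Option.or]
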